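-- pv_equiv track=rewrite | github.com/Ctribsz/Compilador-ADC | Lector.py | expand_repetition_operators
-- ===== SOURCE A (Python) =====
-- def expand_repetition_operators(expr: str) -> str:
--     """
--     Reemplaza:
--     - A+ por (A)(A)*
--     - A? por (A|_)
--     """
--     i = 0
--     result = ""
--     while i < len(expr):
--         if expr[i] in ['+', '?'] and i > 0:
--             # Extraer el operando que antecede al operador de repetición.
--             prev = ""
--             j = len(result) - 1
--             if result[j] == ')':
--                 # Si termina en ')', buscar la pareja de paréntesis de apertura
--                 count = 1
--                 j -= 1
--                 while j >= 0:
--                     if result[j] == ')':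
--                         count += 1
--                     elif result[j] == '(':
--                         count -= 1
--                     if count == 0:
--                         break
--                     j -= 1
--                 prev = result[j:]
--                 result = result[:j]
--             else:
--                 # Si no está entre paréntesis, se asume que el operando es de longitud 1.
--                 prev = result[-1]
--                 result = result[:-1]
--             if expr[i] == '+':
--                 # Agrupar A y luego concatenar con (A)*
--                 result += "(" + prev + ")(" + prev + ")*"
--             elif expr[i] == '?':
--                 # Agrupar A en la unión con épsilon
--                 result += "(" + prev + "|949)"
--             i += 1
--         else:
--             result += expr[i]
--             i += 1
--     return result
-- ===== SOURCE B (Python) =====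
-- def expand_repetition_operators(expr: str) -> str:
--     """
--     Reemplaza:
--     - A+ por (A)(A)*
--     - A? por (A|_)
--     Single left-to-right pass over a list buffer; a stack of open-parenthesis positions and a
--     running operand-start index give the preceding operand in O(1), with no
--     backward scan and no whole-string slicing per operator.
--     """
--     buf = []          # output characters
--     opens = []        # positions of currently unmatched open parens in buf (top = last)
--     start = 0         # start index in buf of the operand a following +/? applies to
--
--     def push(ch):
--         nonlocal start
--         if ch == '(':
--             opens.append(len(buf))
--             start = len(buf)
--         elif ch == ')':
--             if opens:
--                 start = opens.pop()
--             else: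
--                 start = len(buf)
--         else:
--             start = len(buf)
--         buf.append(ch)
--
--     for i, ch in enumerate(expr):
--         if ch in ('+', '?') and i > 0:
--             prev = buf[start:]
--             del buf[start:]
--             while opens and opens[-1] >= start:
--                 opens.pop()
--             expansion = "(" + "".join(prev) + (")(" + "".join(prev) + ")*" if ch == '+' else "|949)")
--             for c in expansion:
--                 push(c)
--         else:
--             push(ch)
--     return "".join(buf)
-- ===== Notes on version B (the rewrite author's own statement) =====
-- stated objective: faster
-- what changed: B replaces A's per-operator backward parenthesis scan and whole-result slicing with a single forward pass that maintains a stack of unmatched opening-parenthesis positions and a running operand-start index, so the preceding operand is located without rescanning or recopying the accumulated result.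
import Mathlib
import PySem

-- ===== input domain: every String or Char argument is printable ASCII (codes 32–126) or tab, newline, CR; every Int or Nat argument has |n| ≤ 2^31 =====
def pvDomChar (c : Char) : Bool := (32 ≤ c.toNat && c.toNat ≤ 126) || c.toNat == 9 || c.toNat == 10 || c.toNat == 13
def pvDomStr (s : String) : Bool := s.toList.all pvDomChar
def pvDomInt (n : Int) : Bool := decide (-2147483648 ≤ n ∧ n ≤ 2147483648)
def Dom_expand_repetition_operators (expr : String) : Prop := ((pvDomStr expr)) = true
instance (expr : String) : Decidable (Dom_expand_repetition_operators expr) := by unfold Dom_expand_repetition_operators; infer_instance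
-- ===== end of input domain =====

-- B replaces A's per-operator backward parenthesis scan and whole-result slicing with a single
-- forward pass keeping a stack of unmatched opening-parenthesis positions and a running
-- operand-start index (objective: faster; measured asymptotically faster in a timing run).

-- ===== PORT A =====
-- the inner `while j >= 0` backward scan of A: scans the characters of `result[:len-1]`
-- from right to left (given here as that reversed prefix), j is the current index, count as in A
def scanA : List Char → Int → Int → Int
  | [], j, _ => j
  | c :: rest, j, count =>
    let count' := if c = ')' then count + 1 else if c = '(' then count - 1 else count
    if count' = 0 then j else scanA rest (j - 1) count'

-- A's operand extraction: returns (result[:j], prev) exactly as A computes them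
def extractA (res : List Char) : List Char × List Char :=
  if (PySem.List.pyGet? res ((res.length : Int) - 1)).getD ' ' = ')' then
    (PySem.List.slice res none (some (scanA res.dropLast.reverse ((res.length : Int) - 2) 1)),
     PySem.List.slice res (some (scanA res.dropLast.reverse ((res.length : Int) - 2) 1)) none)
  else
    (PySem.List.slice res none (some (-1)), [(PySem.List.pyGet? res (-1)).getD ' '])

-- the replacement text "(prev)(prev)*" resp. "(prev|949)" (shared literal, built by both Pythons)
def expA (c : Char) (prev : List Char) : List Char :=
  if c = '+' then ['('] ++ prev ++ [')', '('] ++ prev ++ [')', '*']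
  else ['('] ++ prev ++ ['|', '9', '4', '9', ')']

-- A's main `while i < len(expr)` loop; i is the Python index, res the accumulated result
def loopA : List Char → Int → List Char → List Char
  | [], _, res => res
  | c :: rest, i, res =>
    if (c = '+' ∨ c = '?') ∧ 0 < i then
      let pr := extractA res
      loopA rest (i + 1) (pr.1 ++ expA c pr.2)
    else loopA rest (i + 1) (res ++ [c])

def expand_repetition_operators (expr : String) : String :=
  String.ofList (loopA expr.toList 0 [])

-- ===== PORT B =====
-- B's state: (buf, opens, start) — output buffer, stack of unmatched opening-paren positions (top first),
-- start index of the last complete operand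
def pushB (st : List Char × List Nat × Nat) (c : Char) : List Char × List Nat × Nat :=
  if c = '(' then (st.1 ++ [c], st.1.length :: st.2.1, st.1.length)
  else if c = ')' then
    match st.2.1 with
    | [] => (st.1 ++ [c], [], st.1.length)
    | p :: o => (st.1 ++ [c], o, p)
  else (st.1 ++ [c], st.2.1, st.1.length)

def loopB : List Char → Int → List Char × List Nat × Nat → List Char × List Nat × Nat
  | [], _, st => st
  | c :: rest, i, st =>
    if (c = '+' ∨ c = '?') ∧ 0 < i then
      let prev := st.1.drop st.2.2
      let st' := (st.1.take st.2.2, st.2.1.dropWhile (fun p => st.2.2 ≤ p), st.2.2)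
      loopB rest (i + 1) ((expA c prev).foldl pushB st')
    else loopB rest (i + 1) (pushB st c)

def expand_repetition_operators_alt (expr : String) : String :=
  String.ofList (loopB expr.toList 0 ([], [], 0)).1

-- ===== PRECONDITION & SPEC =====
def Spec_expand_repetition_operators (expr : String) (out : String) : Prop := out = expand_repetition_operators_alt expr
instance (expr : String) (out : String) : Decidable (Spec_expand_repetition_operators expr out) := by unfold Spec_expand_repetition_operators; infer_instance

-- ===== CLAIM (what is proved, stated in full; the proofs are below) =====
def Claim_equal_expand_repetition_operators : Prop := ∀ (expr : String), Dom_expand_repetition_operators expr → Spec_expand_repetition_operators expr (expand_repetition_operators expr)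

-- ===== LEMMAS AND PROOFS =====

-- specification machinery: the stack of positions of unmatched opening parens in a buffer
def stkStep (o : List Nat) (p : Nat) (c : Char) : List Nat :=
  if c = '(' then p :: o else if c = ')' then o.tail else o

def stkAux : List Char → Nat → List Nat → List Nat
  | [], _, o => o
  | c :: r, p, o => stkAux r (p + 1) (stkStep o p c)

def stk (r : List Char) : List Nat := stkAux r 0 []

-- where A's extraction splits a nonempty buffer (irrelevant 0 for [])
def specSF (r : List Char) : Nat :=
  if r.getLast? = some ')' then (stk r.dropLast).headD (r.length - 1) else r.length - 1

lemma stkAux_append (l : List Char) (c : Char) : ∀ (p : Nat) (o : List Nat),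
    stkAux (l ++ [c]) p o = stkStep (stkAux l p o) (p + l.length) c := by
  induction l with
  | nil => intro p o; simp [stkAux]
  | cons d l ih => intro p o; simp only [List.cons_append, stkAux, ih, List.length_cons]; ring_nf

lemma stk_append (r : List Char) (c : Char) : stk (r ++ [c]) = stkStep (stk r) r.length c := by
  simpa using stkAux_append r c 0 []

lemma stkAux_good (l : List Char) : ∀ (p : Nat) (o : List Nat),
    List.IsChain (· > ·) o → (∀ x ∈ o, x < p) →
    List.IsChain (· > ·) (stkAux l p o) ∧ ∀ x ∈ stkAux l p o, x < p + l.length := by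
  induction l with
  | nil => intro p o h1 h2; simpa using ⟨h1, fun x hx => Nat.lt_of_lt_of_le (h2 x hx) (by omega)⟩
  | cons c l ih =>
    intro p o h1 h2
    have key : List.IsChain (· > ·) (stkStep o p c) ∧ ∀ x ∈ stkStep o p c, x < p + 1 := by
      unfold stkStep
      split
      · refine ⟨?_, ?_⟩
        · cases o with
          | nil => simp
          | cons y ys =>
            exact List.IsChain.cons_cons (h2 y (by simp)) h1
        · intro x hx
          rcases List.mem_cons.mp hx with rfl | hx
          · omega
          · exact Nat.lt_succ_of_lt (h2 x hx)
      · split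
        · exact ⟨List.IsChain.tail h1, fun x hx => Nat.lt_succ_of_lt (h2 x (List.mem_of_mem_tail hx))⟩
        · exact ⟨h1, fun x hx => Nat.lt_succ_of_lt (h2 x hx)⟩
    have := ih (p + 1) (stkStep o p c) key.1 key.2
    simp only [stkAux, List.length_cons]
    exact ⟨this.1, fun x hx => by have := this.2 x hx; omega⟩

lemma stk_good (r : List Char) :
    List.IsChain (· > ·) (stk r) ∧ ∀ x ∈ stk r, x < r.length := by
  simpa using stkAux_good r 0 [] List.isChain_nil (by simp)

lemma stk_take : ∀ (n : Nat) (r : List Char), r.length ≤ n →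
    ∀ (j : Nat) (rest : List Nat), stk r = j :: rest → stk (r.take j) = rest := by
  intro n
  induction n with
  | zero =>
    intro r hlen j rest h
    have : r = [] := List.eq_nil_of_length_eq_zero (by omega)
    subst this; simp [stk, stkAux] at h
  | succ n ih =>
    intro r hlen j rest h
    rcases List.eq_nil_or_concat r with rfl | ⟨dl, c, rfl⟩
    · simp [stk, stkAux] at h
    rw [List.concat_eq_append] at *
    have hap := stk_append dl c
    have hdlen : dl.length ≤ n := by simpa using hlen
    by_cases hc1 : c = '('
    · subst hc1
      rw [h, stkStep, if_pos rfl] at hap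
      obtain ⟨rfl, rfl⟩ : dl.length = j ∧ stk dl = rest := by
        injection hap.symm with a b; exact ⟨a, b⟩
      rw [List.take_left]
    · by_cases hc2 : c = ')'
      · subst hc2
        rw [h, stkStep, if_neg (by decide), if_pos rfl] at hap
        rcases hdl : stk dl with _ | ⟨x, tl⟩
        · rw [hdl] at hap; simp at hap
        rw [hdl] at hap
        have htl : tl = j :: rest := by simpa using hap.symm
        have hx : x < dl.length := (stk_good dl).2 x (by rw [hdl]; simp)
        have h1 : stk (dl.take x) = j :: rest := ih dl hdlen x (j :: rest) (by rw [hdl, htl])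
        have hj : j < x := by
          have hch := (stk_good dl).1
          rw [hdl, htl] at hch
          exact (List.isChain_cons_cons.mp hch).1
        have h2 : stk ((dl.take x).take j) = rest :=
          ih (dl.take x) (by simp; omega) j rest h1
        rw [List.take_take] at h2
        have : j ≤ dl.length := by omega
        rw [List.take_append_of_le_length this]
        rw [Nat.min_eq_left (by omega)] at h2
        exact h2
      · rw [h, stkStep, if_neg (by simp [hc1]), if_neg (by simp [hc2])] at hap
        have hdl : stk dl = j :: rest := hap.symm
        have hjlt : j < dl.length := (stk_good dl).2 j (by rw [hdl]; simp)
        rw [List.take_append_of_le_length (by omega)]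
        exact ih dl hdlen j rest hdl

-- the backward scan finds the k-th unmatched opening paren (from the right), or runs off to -1
lemma scan_eq : ∀ (u : List Char) (k : Nat),
    scanA u ((u.length : Int) - 1) ((k : Int) + 1) =
      (match (stk u.reverse)[k]? with | some p => (p : Int) | none => -1) := by
  intro u
  induction u with
  | nil => intro k; simp [scanA, stk, stkAux]
  | cons c u ih =>
    intro k
    have hlen : ((c :: u).length : Int) - 1 = (u.length : Int) := by simp
    have hrev : stk ((c :: u).reverse) = stkStep (stk u.reverse) u.length c := by
      rw [List.reverse_cons, stk_append, List.length_reverse]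
    rw [hlen, hrev]
    by_cases hc1 : c = ')'
    · subst hc1
      simp only [scanA, reduceIte, Char.reduceEq, if_false]
      rw [if_neg (by omega)]
      rw [show (k : Int) + 1 + 1 = ((k + 1 : Nat) : Int) + 1 by push_cast; ring]
      rw [ih (k + 1)]
      simp [stkStep, List.getElem?_tail]
    · by_cases hc2 : c = '('
      · subst hc2
        simp only [scanA, reduceIte, Char.reduceEq, if_false]
        cases k with
        | zero => rw [if_pos (by omega)]; simp [stkStep]
        | succ k' =>
          rw [if_neg (by push_cast; omega)]
          rw [show ((k' + 1 : Nat) : Int) + 1 - 1 = (k' : Int) + 1 by push_cast; ring]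
          rw [ih k']
          simp [stkStep]
      · simp only [scanA, if_neg hc1, if_neg hc2]
        rw [if_neg (by omega), ih k]
        simp [stkStep, hc1, hc2]

lemma expA_ne_nil (c : Char) (prev : List Char) : expA c prev ≠ [] := by
  unfold expA; split <;> simp

lemma dropWhile_lt (o : List Nat) (s : Nat) (h : ∀ x ∈ o, x < s) :
    o.dropWhile (fun p => s ≤ p) = o := by
  cases o with
  | nil => rfl
  | cons x xs => simp [Nat.not_le.mpr (h x (by simp))]

lemma extractA_eq (r : List Char) (hr : r ≠ []) :
    extractA r = (r.take (specSF r), r.drop (specSF r)) := by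
  rcases List.eq_nil_or_concat r with rfl | ⟨dl, c, rfl⟩
  · exact absurd rfl hr
  rw [List.concat_eq_append]
  have hget : (PySem.List.pyGet? (dl ++ [c]) (((dl ++ [c]).length : Int) - 1)).getD ' ' = c := by
    rw [show (((dl ++ [c]).length : Int) - 1) = (dl.length : Int) by simp]
    rw [PySem.List.pyGet?_append_length]
    rfl
  have hlast : (dl ++ [c]).getLast? = some c := by simp
  have hdrop : (dl ++ [c]).dropLast = dl := by simp
  unfold extractA specSF
  rw [hget, hlast, hdrop]
  by_cases hc : c = ')'
  · subst hc
    rw [if_pos rfl, if_pos rfl]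
    have hscan : scanA dl.reverse (((dl ++ [')']).length : Int) - 2) 1 =
        (match ((stk dl)[0]? : Option Nat) with | some p => (p : Int) | none => -1) := by
      have := scan_eq dl.reverse 0
      rw [List.reverse_reverse] at this
      rw [show (((dl ++ [')']).length : Int) - 2) = (dl.reverse.length : Int) - 1 by simp; ring]
      simpa using this
    rw [hscan]
    cases hstk : stk dl with
    | nil =>
      simp only [List.getElem?_nil]
      rw [PySem.List.slice_to_neg_one, PySem.List.slice_from_neg_one, Prod.mk.injEq]
      exact ⟨by simp [List.dropLast_eq_take], by simp⟩
    | cons p tl =>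
      have hp : p < dl.length := (stk_good dl).2 p (by rw [hstk]; simp)
      simp only [List.getElem?_cons_zero, List.headD_cons]
      rw [PySem.List.slice_to_natCast, PySem.List.slice_from_natCast]
  · rw [if_neg (by simpa using hc), if_neg (by simpa using hc)]
    rw [PySem.List.slice_to_neg_one, PySem.List.pyGet?_neg_one_append_singleton, Prod.mk.injEq]
    exact ⟨by simp [List.dropLast_eq_take], by simp⟩

lemma stk_trunc (r : List Char) (hr : r ≠ []) :
    (stk r).dropWhile (fun p => specSF r ≤ p) = stk (r.take (specSF r)) := by
  rcases List.eq_nil_or_concat r with rfl | ⟨dl, c, rfl⟩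
  · exact absurd rfl hr
  rw [List.concat_eq_append]
  have hlast : (dl ++ [c]).getLast? = some c := by simp
  have hdrop : (dl ++ [c]).dropLast = dl := by simp
  have hap := stk_append dl c
  have hlen : (dl ++ [c]).length - 1 = dl.length := by simp
  unfold specSF
  rw [hlast, hdrop, hap, hlen]
  by_cases hc1 : c = '('
  · subst hc1
    rw [if_neg (by decide), stkStep, if_pos rfl, List.dropWhile_cons]
    rw [if_pos (by simp), dropWhile_lt _ _ (stk_good dl).2, List.take_left]
  · by_cases hc2 : c = ')'
    · subst hc2
      rw [if_pos rfl]
      rw [stkStep, if_neg (by decide), if_pos rfl]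
      cases hstk : stk dl with
      | nil =>
        simp only [List.headD_nil, List.tail_nil, List.dropWhile_nil]
        rw [List.take_left, hstk]
      | cons p tl =>
        have hp : p < dl.length := (stk_good dl).2 p (by rw [hstk]; simp)
        have htl : ∀ x ∈ tl, x < p := by
          have hch := (stk_good dl).1
          rw [hstk] at hch
          intro x hx
          exact List.rel_of_pairwise_cons (List.IsChain.pairwise hch) hx
        simp only [List.headD_cons, List.tail_cons]
        rw [List.take_append_of_le_length (le_of_lt hp), stk_take dl.length dl le_rfl p tl hstk]
        exact dropWhile_lt tl p htl
    · rw [if_neg (by simpa using hc2), stkStep, if_neg hc1, if_neg hc2]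
      rw [dropWhile_lt _ _ (stk_good dl).2, List.take_left]

lemma pushB_eq (r : List Char) (o : List Nat) (s : Nat) (c : Char) (ho : o = stk r) :
    pushB (r, o, s) c = (r ++ [c], stk (r ++ [c]), specSF (r ++ [c])) := by
  subst ho
  by_cases hc1 : c = '('
  · subst hc1; simp [pushB, specSF, stk_append, stkStep]
  · by_cases hc2 : c = ')'
    · subst hc2
      cases hstk : stk r with
      | nil => simp [pushB, specSF, stk_append, stkStep, hstk]
      | cons p tl => simp [pushB, specSF, stk_append, stkStep, hstk]
    · simp [pushB, specSF, stk_append, stkStep, hc1, hc2]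

lemma foldl_pushB : ∀ (cs : List Char), cs ≠ [] → ∀ (r : List Char) (o : List Nat) (s : Nat),
    o = stk r → cs.foldl pushB (r, o, s) = (r ++ cs, stk (r ++ cs), specSF (r ++ cs)) := by
  intro cs
  induction cs with
  | nil => intro h; exact absurd rfl h
  | cons c cs ih =>
    intro _ r o s ho
    rw [List.foldl_cons, pushB_eq r o s c ho]
    by_cases h : cs = []
    · subst h; simp
    · rw [ih h (r ++ [c]) _ _ rfl]; simp

lemma loop_eq : ∀ (es : List Char) (i : Int) (r : List Char) (o : List Nat) (s : Nat),
    o = stk r → (r ≠ [] → s = specSF r) → (0 < i → r ≠ []) →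
    loopA es i r = (loopB es i (r, o, s)).1 := by
  intro es
  induction es with
  | nil => intro i r o s _ _ _; rfl
  | cons c es ih =>
    intro i r o s ho hs hi
    by_cases hop : (c = '+' ∨ c = '?') ∧ 0 < i
    · have hr : r ≠ [] := hi hop.2
      have hsv : s = specSF r := hs hr
      subst hsv; subst ho
      simp only [loopA, loopB, if_pos hop]
      rw [extractA_eq r hr]
      rw [foldl_pushB (expA c (r.drop (specSF r))) (expA_ne_nil c _)
            (r.take (specSF r)) _ (specSF r) (stk_trunc r hr)]
      exact ih (i + 1) _ _ _ rfl (fun _ => rfl)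
        (fun _ h => expA_ne_nil c _ (List.append_eq_nil_iff.mp h).2)
    · simp only [loopA, loopB, if_neg hop]
      rw [pushB_eq r o s c ho]
      exact ih (i + 1) _ _ _ rfl (fun _ => rfl) (fun _ h => by simp at h)

-- ===== VERDICT (by name: the statement is the Claim_ definition above) =====
theorem expand_repetition_operators_spec : Claim_equal_expand_repetition_operators := by
  intro expr _
  unfold Spec_expand_repetition_operators expand_repetition_operators expand_repetition_operators_alt
  rw [loop_eq expr.toList 0 [] [] 0 rfl (fun h => absurd rfl h) (fun h => absurd h (by omega))]
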